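-- pv_equiv track=rewrite | github.com/mdressman/creatine | promptintel.py | _split_rules
-- ===== SOURCE A (Python) =====
-- def _split_rules(rules_text: str) -> list[str]:
--     """Split a rules file into individual rule blocks."""
--     rules = []
--     current_rule = []
--     brace_count = 0
--
--     for line in rules_text.split('\n'):
--         current_rule.append(line)
--         brace_count += line.count('{') - line.count('}')
--
--         if brace_count == 0 and current_rule:
--             rule_text = '\n'.join(current_rule).strip()
--             if rule_text.startswith('rule '):
--                 rules.append(rule_text)
--             current_rule = []
--
--     return rules
-- ===== SOURCE B (Python) =====
-- def _split_rules(rules_text: str) -> list[str]: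
--     """Split a rules file into individual rule blocks."""
--     lines = rules_text.split('\n')
--     # pass 1: indices just past every line where the cumulative brace balance hits 0
--     boundaries = []
--     balance = 0
--     for i, line in enumerate(lines):
--         balance += line.count('{') - line.count('}')
--         if balance == 0:
--             boundaries.append(i + 1)
--     # pass 2: slice the lines at those boundaries (an unbalanced tail is dropped)
--     rules = []
--     start = 0
--     for b in boundaries:
--         text = '\n'.join(lines[start:b]).strip()
--         if text.startswith('rule '):
--             rules.append(text)
--         start = b
--     return rules
-- ===== Notes on version B (the rewrite author's own statement) =====
-- stated objective: alternative
-- what changed: A's single interleaved accumulate-and-flush loop is replaced by two passes: first collect the indices where the cumulative brace balance is 0 (block boundaries), then slice the line list at those boundaries, join/strip each chunk and keep those starting with 'rule ' (an unbalanced tail has no final boundary and is dropped, as in A).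
import Mathlib
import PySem

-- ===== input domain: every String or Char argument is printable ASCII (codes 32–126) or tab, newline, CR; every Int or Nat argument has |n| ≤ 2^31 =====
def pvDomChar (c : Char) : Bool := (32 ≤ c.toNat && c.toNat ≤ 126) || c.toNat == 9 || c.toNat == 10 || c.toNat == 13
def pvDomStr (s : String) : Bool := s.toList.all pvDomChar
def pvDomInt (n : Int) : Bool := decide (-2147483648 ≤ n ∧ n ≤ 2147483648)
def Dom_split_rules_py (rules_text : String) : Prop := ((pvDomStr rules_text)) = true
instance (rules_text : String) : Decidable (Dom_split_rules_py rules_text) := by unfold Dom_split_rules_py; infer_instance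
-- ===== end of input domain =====

-- B replaces A's interleaved accumulate-and-flush loop by two passes (collect the zero-balance
-- boundary indices, then slice the line list at them); objective: alternative decomposition.

-- ===== PORT A =====
-- the body of A's for-loop, as a step function over the state (rules, current_rule, brace_count)
def pvStepA (s : List String × List String × Int) (line : String) : List String × List String × Int :=
  let current_rule := s.2.1 ++ [line]
  let brace_count := s.2.2 + ((PySem.Str.count line "{" : Int) - (PySem.Str.count line "}" : Int))
  if brace_count == 0 && !current_rule.isEmpty then
    let rule_text := PySem.Str.strip (PySem.Str.join "\n" current_rule)
    ((if PySem.Str.startswith rule_text "rule " then s.1 ++ [rule_text] else s.1), [], brace_count)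
  else (s.1, current_rule, brace_count)

def split_rules_py (rules_text : String) : List String :=
  (((PySem.Str.split? rules_text "\n").getD []).foldl pvStepA ([], [], 0)).1

-- ===== PORT B =====
-- pass-1 step: update the running balance, record i+1 when it is 0
def pvStepBnd (s : Int × List Int) (il : Int × String) : Int × List Int :=
  let balance := s.1 + ((PySem.Str.count il.2 "{" : Int) - (PySem.Str.count il.2 "}" : Int))
  (balance, if balance == 0 then s.2 ++ [il.1 + 1] else s.2)

-- pass-2 step: slice lines[start:b], join, strip, keep if it starts with "rule "
def pvStepChunk (lines : List String) (s : List String × Int) (b : Int) : List String × Int :=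
  let text := PySem.Str.strip (PySem.Str.join "\n" (PySem.List.slice lines (some s.2) (some b)))
  ((if PySem.Str.startswith text "rule " then s.1 ++ [text] else s.1), b)

def split_rules_py_alt (rules_text : String) : List String :=
  let lines := (PySem.Str.split? rules_text "\n").getD []
  let p := (PySem.List.enumerate lines).foldl pvStepBnd (0, [])
  let r := p.2.foldl (pvStepChunk lines) ([], 0)
  r.1

-- ===== PRECONDITION & SPEC =====
def Spec_split_rules_py (rules_text : String) (out : List String) : Prop := out = split_rules_py_alt rules_text
instance (rules_text : String) (out : List String) : Decidable (Spec_split_rules_py rules_text out) := by unfold Spec_split_rules_py; infer_instance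

-- ===== CLAIM (what is proved, stated in full; the proofs are below) =====
def Claim_equal_split_rules_py : Prop := ∀ (rules_text : String), Dom_split_rules_py rules_text → Spec_split_rules_py rules_text (split_rules_py rules_text)

-- ===== LEMMAS AND PROOFS =====

-- per-line brace balance delta
def pvDelta (l : String) : Int := (PySem.Str.count l "{" : Int) - (PySem.Str.count l "}" : Int)

-- emit a flushed chunk
def pvEmit (chunk : List String) : List String :=
  let t := PySem.Str.strip (PySem.Str.join "\n" chunk)
  if PySem.Str.startswith t "rule " then [t] else []

-- recursive form of A's loop
def pvLoopA (rules cur : List String) (bc : Int) : List String → List String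
  | [] => rules
  | l :: ls =>
    let cur' := cur ++ [l]
    let bc' := bc + pvDelta l
    if bc' == 0 && !cur'.isEmpty then pvLoopA (rules ++ pvEmit cur') [] bc' ls
    else pvLoopA rules cur' bc' ls

-- recursive form of B's boundary pass (i = absolute index of the first line of the argument)
def pvBnds (i : Nat) (bal : Int) : List String → List Nat
  | [] => []
  | l :: ls =>
    let bal' := bal + pvDelta l
    (if bal' == 0 then [i + 1] else []) ++ pvBnds (i + 1) bal' ls

-- recursive form of B's slicing pass
def pvChunks (all : List String) (start : Nat) : List Nat → List String
  | [] => []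
  | b :: bs => pvEmit ((all.drop start).take (b - start)) ++ pvChunks all b bs

theorem pvLoopA_eq_foldl (lines : List String) : ∀ (rules cur : List String) (bc : Int),
    (lines.foldl pvStepA (rules, cur, bc)).1 = pvLoopA rules cur bc lines := by
  induction lines with
  | nil => intro rules cur bc; rfl
  | cons l ls ih =>
    intro rules cur bc
    simp only [List.foldl_cons, pvStepA, pvLoopA, pvDelta, pvEmit]
    split_ifs <;> simp [ih]

theorem pvBnds_eq_foldl (lines : List String) : ∀ (i : Nat) (bal : Int) (acc : List Int),
    ((PySem.List.enumerate lines (i : Int)).foldl pvStepBnd (bal, acc)).2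
      = acc ++ (pvBnds i bal lines).map (Nat.cast : Nat → Int) := by
  induction lines with
  | nil => intro i bal acc; simp [PySem.List.enumerate_nil, pvBnds]
  | cons l ls ih =>
    intro i bal acc
    have hcast : ((i : Int) + 1) = ((i + 1 : Nat) : Int) := by push_cast; ring
    simp only [PySem.List.enumerate_cons, List.foldl_cons, pvStepBnd, pvBnds, pvDelta, hcast]
    split_ifs with hbe <;> rw [ih] <;> simp

theorem pvChunks_eq_foldl (bs : List Nat) : ∀ (all acc : List String) (start : Nat),
    ((bs.map (Nat.cast : Nat → Int)).foldl (pvStepChunk all) (acc, (start : Int))).1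
      = acc ++ pvChunks all start bs := by
  induction bs with
  | nil => intro all acc start; simp [pvChunks]
  | cons b bs ih =>
    intro all acc start
    simp only [List.map_cons, List.foldl_cons, pvStepChunk, pvChunks, pvEmit,
      PySem.List.slice_natCast]
    split_ifs <;> simp [ih]

-- the main invariant: A's interleaved loop equals B's boundary-then-slice composition
theorem pvMain (lines : List String) : ∀ (all rules cur : List String) (start : Nat) (bal : Int),
    all.drop start = cur ++ lines →
    pvLoopA rules cur bal lines
      = rules ++ pvChunks all start (pvBnds (start + cur.length) bal lines) := by
  induction lines with
  | nil => intro all rules cur start bal h; simp [pvLoopA, pvBnds, pvChunks]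
  | cons l ls ih =>
    intro all rules cur start bal h
    have hne : ((cur ++ [l]).isEmpty) = false := by simp
    simp only [pvLoopA, pvBnds, hne, Bool.not_false, Bool.and_true]
    cases hbe : (bal + pvDelta l == 0) with
    | false =>
      simp only [Bool.false_eq_true, if_false, List.nil_append]
      have hidx : start + cur.length + 1 = start + (cur ++ [l]).length := by
        simp only [List.length_append, List.length_cons, List.length_nil]; omega
      rw [hidx, ih all rules (cur ++ [l]) start (bal + pvDelta l) (by simpa using h)]
    | true =>
      simp only [if_true, List.singleton_append, pvChunks]
      have htail : List.drop (start + cur.length + 1) all = ls := by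
        have h2 : List.drop (start + cur.length + 1) all
            = List.drop (cur.length + 1) (List.drop start all) := by
          rw [List.drop_drop, show start + (cur.length + 1) = start + cur.length + 1 from by omega]
        rw [h2, h, show cur ++ l :: ls = (cur ++ [l]) ++ ls by simp,
          List.drop_left' (by simp)]
      have htake : List.take (start + cur.length + 1 - start) (List.drop start all)
          = cur ++ [l] := by
        rw [show start + cur.length + 1 - start = cur.length + 1 by omega, h,
          show cur ++ l :: ls = (cur ++ [l]) ++ ls by simp,
          List.take_left' (by simp)]
      have hrec := ih all (rules ++ pvEmit (cur ++ [l])) [] (start + cur.length + 1)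
        (bal + pvDelta l) (by simpa using htail)
      simp only [List.length_nil, Nat.add_zero] at hrec
      rw [hrec, htake]
      simp [List.append_assoc]

-- ===== VERDICT (by name: the statement is the Claim_ definition above) =====
theorem split_rules_py_spec : Claim_equal_split_rules_py := by
  intro rules_text _
  unfold Spec_split_rules_py split_rules_py split_rules_py_alt
  generalize (PySem.Str.split? rules_text "\n").getD [] = lines
  have hb := pvBnds_eq_foldl lines 0 0 []
  simp only [Nat.cast_zero, List.nil_append] at hb
  have hc := pvChunks_eq_foldl (pvBnds 0 0 lines) lines [] 0
  simp only [Nat.cast_zero, List.nil_append] at hc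
  simp only [pvLoopA_eq_foldl, hb, hc]
  have := pvMain lines lines [] [] 0 0 (by simp)
  simpa using this
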